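-- pv_equiv track=rewrite | github.com/mwoss/algorithms | interviews/s/language_header.py | get_accepted_languages_with_tags
-- ===== SOURCE A (Python) =====
-- from typing import List
--
-- def get_accepted_languages_with_tags(user_language_header: str, server_acceptable_languages: List[str]) -> List[str]:
--     parsed_user_langs = [lang.strip() for lang in user_language_header.split(",")]
--     already_added, accepted_langs = set(), []
--
--     for lang in parsed_user_langs:
--         if "-" not in lang:
--             for server_lang in server_acceptable_languages:
--                 if server_lang.startswith(lang) and server_lang not in already_added:
--                     accepted_langs.append(server_lang)
--                     already_added.add(server_lang)
--         elif lang in server_acceptable_languages and lang not in already_added: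
--             accepted_langs.append(lang)
--             already_added.add(lang)
--
--     return accepted_langs
-- ===== SOURCE B (Python) =====
-- def get_accepted_languages_with_tags(user_language_header, server_acceptable_languages):
--     # Sieve: walk the user tokens once, each time emitting the matching languages
--     # from a shrinking pool of distinct server languages and removing them from the pool.
--     tokens = [t.strip() for t in user_language_header.split(",")]
--     pool = list(dict.fromkeys(server_acceptable_languages))
--     out = []
--     for t in tokens:
--         if "-" in t:
--             hit = lambda s, t=t: s == t
--         else:
--             hit = lambda s, t=t: s.startswith(t)
--         out.extend(s for s in pool if hit(s))
--         pool = [s for s in pool if not hit(s)]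
--     return out
-- ===== Notes on version B (the rewrite author's own statement) =====
-- stated objective: alternative
-- what changed: B is a sieve: it deduplicates the server list once into a pool, then for each user token emits the pool entries it matches and removes them from the pool, so no seen-set is kept and each token scans only the still-unmatched languages instead of the whole server list.
import Mathlib
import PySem

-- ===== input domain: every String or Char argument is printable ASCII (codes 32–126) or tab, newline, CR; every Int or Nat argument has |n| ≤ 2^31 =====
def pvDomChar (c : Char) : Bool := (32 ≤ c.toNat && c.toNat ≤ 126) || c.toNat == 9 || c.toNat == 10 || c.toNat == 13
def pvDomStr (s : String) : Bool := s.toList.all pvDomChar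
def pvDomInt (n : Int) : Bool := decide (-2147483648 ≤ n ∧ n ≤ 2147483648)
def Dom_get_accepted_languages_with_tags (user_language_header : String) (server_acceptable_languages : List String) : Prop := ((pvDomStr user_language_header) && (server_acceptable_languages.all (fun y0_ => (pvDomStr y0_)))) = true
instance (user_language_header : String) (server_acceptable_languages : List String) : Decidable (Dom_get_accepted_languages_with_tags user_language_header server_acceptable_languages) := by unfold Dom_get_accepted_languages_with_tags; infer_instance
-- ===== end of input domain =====

-- B replaces A's token-major nested loops with a seen-set by a sieve over a shrinking
-- pool of distinct server languages (emit matches, remove them from the pool); objective: alternative.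

-- ===== PORT A =====
def get_accepted_languages_with_tags (user_language_header : String) (server_acceptable_languages : List String) : List String :=
  let parsed_user_langs := ((PySem.Str.split? user_language_header ",").getD []).map (fun lang => PySem.Str.strip lang)
  let st := parsed_user_langs.foldl
    (fun (st : PySem.Set String × List String) lang =>
      if PySem.Str.isIn "-" lang = false then
        server_acceptable_languages.foldl
          (fun st server_lang =>
            if PySem.Str.startswith server_lang lang = true ∧ PySem.Set.contains st.1 server_lang = false then
              (PySem.Set.add st.1 server_lang, st.2 ++ [server_lang])
            else st) st
      else if lang ∈ server_acceptable_languages ∧ PySem.Set.contains st.1 lang = false then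
        (PySem.Set.add st.1 lang, st.2 ++ [lang])
      else st)
    (PySem.Set.empty, [])
  st.2

-- ===== PORT B =====
-- B-side helper: the per-token match test (Source B's `hit` lambdas)
def pvHit (t s : String) : Bool :=
  if PySem.Str.isIn "-" t then s == t else PySem.Str.startswith s t

def get_accepted_languages_with_tags_alt (user_language_header : String) (server_acceptable_languages : List String) : List String :=
  let tokens := ((PySem.Str.split? user_language_header ",").getD []).map (fun t => PySem.Str.strip t)
  let st := tokens.foldl
    (fun (st : List String × List String) t =>
      (st.1 ++ st.2.filter (fun s => pvHit t s), st.2.filter (fun s => !pvHit t s)))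
    ([], PySem.List.dedup server_acceptable_languages)
  st.1

-- ===== PRECONDITION & SPEC =====
def Spec_get_accepted_languages_with_tags (user_language_header : String) (server_acceptable_languages : List String) (out : List String) : Prop := out = get_accepted_languages_with_tags_alt user_language_header server_acceptable_languages
instance (user_language_header : String) (server_acceptable_languages : List String) (out : List String) : Decidable (Spec_get_accepted_languages_with_tags user_language_header server_acceptable_languages out) := by unfold Spec_get_accepted_languages_with_tags; infer_instance

-- ===== CLAIM (what is proved, stated in full; the proofs are below) =====
def Claim_equal_get_accepted_languages_with_tags : Prop := ∀ (user_language_header : String) (server_acceptable_languages : List String), Dom_get_accepted_languages_with_tags user_language_header server_acceptable_languages → Spec_get_accepted_languages_with_tags user_language_header server_acceptable_languages (get_accepted_languages_with_tags user_language_header server_acceptable_languages)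

-- ===== LEMMAS AND PROOFS =====

-- What one user token contributes, read off A's two branches.
def pvMatches (server_acceptable_languages : List String) (lang : String) : List String :=
  if PySem.Str.isIn "-" lang = true then
    (if lang ∈ server_acceptable_languages then [lang] else [])
  else
    server_acceptable_languages.filter (fun s => PySem.Str.startswith s lang)

-- One dedup step on a (seen-set, output) pair: append x iff not seen yet.
def dedupAdd (st : PySem.Set String × List String) (x : String) : PySem.Set String × List String :=
  if PySem.Set.contains st.1 x = true then st else (PySem.Set.add st.1 x, st.2 ++ [x])

-- A's inner server loop is a dedupAdd-fold over the startswith-filtered server list.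
lemma inner_loop_eq_filter (lang : String) :
    ∀ (server : List String) (st : PySem.Set String × List String),
      server.foldl
        (fun st server_lang =>
          if PySem.Str.startswith server_lang lang = true ∧ PySem.Set.contains st.1 server_lang = false then
            (PySem.Set.add st.1 server_lang, st.2 ++ [server_lang])
          else st) st
      = (server.filter (fun s => PySem.Str.startswith s lang)).foldl dedupAdd st := by
  intro server
  induction server with
  | nil => intro st; rfl
  | cons s rest ih =>
    intro st
    rw [List.foldl_cons, List.filter_cons]
    by_cases hs : PySem.Str.startswith s lang = true
    · rw [if_pos hs, List.foldl_cons, ih]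
      congr 1
      unfold dedupAdd
      by_cases hc : PySem.Set.contains st.1 s = true
      · rw [if_pos hc, if_neg]
        intro h; rw [hc] at h; exact absurd h.2 (by simp)
      · have hc' := eq_false_of_ne_true hc
        rw [if_pos ⟨hs, hc'⟩, if_neg (by rw [hc']; simp)]
    · have hs' := eq_false_of_ne_true hs
      rw [if_neg (fun h => hs h.1), if_neg (by rw [hs']; simp), ih]

-- A's elif step is a dedupAdd-fold over the exact-match list.
lemma exact_step_eq (lang : String) (server : List String) (st : PySem.Set String × List String) :
    (if lang ∈ server ∧ PySem.Set.contains st.1 lang = false then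
        (PySem.Set.add st.1 lang, st.2 ++ [lang])
      else st)
      = (if lang ∈ server then [lang] else []).foldl dedupAdd st := by
  by_cases hm : lang ∈ server
  · rw [if_pos hm, List.foldl_cons, List.foldl_nil]
    unfold dedupAdd
    by_cases hc : PySem.Set.contains st.1 lang = true
    · rw [if_pos hc, if_neg]
      intro h; rw [hc] at h; exact absurd h.2 (by simp)
    · have hc' := eq_false_of_ne_true hc
      rw [if_pos ⟨hm, hc'⟩, if_neg (by rw [hc']; simp)]
  · rw [if_neg (fun h => hm h.1), if_neg hm, List.foldl_nil]

-- Folding dedupAdd over a flatMap = folding the per-block folds.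
lemma foldl_dedupAdd_flatMap {α : Type} (f : α → List String) :
    ∀ (l : List α) (st : PySem.Set String × List String),
      (l.flatMap f).foldl dedupAdd st = l.foldl (fun st x => (f x).foldl dedupAdd st) st := by
  intro l
  induction l with
  | nil => intro st; rfl
  | cons x rest ih =>
    intro st
    rw [List.flatMap_cons, List.foldl_append, List.foldl_cons]
    exact ih _

-- On diagonal states, one dedupAdd step is PySem.Set.add in both components.
lemma dedupAdd_diag (s : PySem.Set String) (x : String) :
    dedupAdd (s, s) x = (PySem.Set.add s x, PySem.Set.add s x) := by
  unfold dedupAdd PySem.Set.add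
  by_cases hc : PySem.Set.contains s x = true
  · rw [if_pos hc, if_pos hc]
  · have hc' := eq_false_of_ne_true hc
    rw [if_neg (by rw [hc']; simp), if_neg (by rw [hc']; simp)]

lemma foldl_dedupAdd_diag :
    ∀ (raw : List String) (s : PySem.Set String),
      raw.foldl dedupAdd (s, s) = (raw.foldl PySem.Set.add s, raw.foldl PySem.Set.add s) := by
  intro raw
  induction raw with
  | nil => intro s; rfl
  | cons x rest ih =>
    intro s
    rw [List.foldl_cons, dedupAdd_diag, List.foldl_cons]
    exact ih _

-- A computes the ordered dedup of the concatenation of the per-token match lists.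
lemma A_eq_dedup_flatMap (user_language_header : String) (server : List String) :
    get_accepted_languages_with_tags user_language_header server
      = PySem.List.dedup
          ((((PySem.Str.split? user_language_header ",").getD []).map (fun t => PySem.Str.strip t)).flatMap
            (fun t => pvMatches server t)) := by
  unfold get_accepted_languages_with_tags
  dsimp only
  have hstep :
      (fun (st : PySem.Set String × List String) lang =>
        if PySem.Str.isIn "-" lang = false then
          server.foldl
            (fun st server_lang =>
              if PySem.Str.startswith server_lang lang = true ∧ PySem.Set.contains st.1 server_lang = false then
                (PySem.Set.add st.1 server_lang, st.2 ++ [server_lang])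
              else st) st
        else if lang ∈ server ∧ PySem.Set.contains st.1 lang = false then
          (PySem.Set.add st.1 lang, st.2 ++ [lang])
        else st)
      = (fun st lang => (pvMatches server lang).foldl dedupAdd st) := by
    funext st lang
    unfold pvMatches
    by_cases hd : PySem.Str.isIn "-" lang = true
    · rw [if_neg (by rw [hd]; simp), if_pos hd]
      exact exact_step_eq lang server st
    · have hd' := eq_false_of_ne_true hd
      rw [if_pos hd', if_neg (by rw [hd']; simp)]
      exact inner_loop_eq_filter lang server st
  rw [hstep]
  rw [← foldl_dedupAdd_flatMap (f := fun lang => pvMatches server lang)]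
  have hempty : (PySem.Set.empty : PySem.Set String) = ([] : List String) := rfl
  rw [hempty, foldl_dedupAdd_diag]
  rw [PySem.List.dedup_eq_ofList, PySem.Set.ofList_eq_foldl]

-- Folding Set.add from an arbitrary accumulator appends the not-yet-seen part of the dedup.
lemma foldl_add_acc :
    ∀ (ys acc : List String),
      ys.foldl PySem.Set.add acc = acc ++ (PySem.List.dedup ys).filter (fun s => !acc.contains s) := by
  intro ys
  induction ys with
  | nil => intro acc; simp [PySem.List.dedup]
  | cons y ys ih =>
    intro acc
    have hcons : PySem.List.dedup (y :: ys)
        = y :: (PySem.List.dedup ys).filter (fun s => !([y] : List String).contains s) := by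
      rw [PySem.List.dedup_eq_ofList, PySem.Set.ofList_eq_foldl, List.foldl_cons]
      have h0 : PySem.Set.add ([] : List String) y = [y] := rfl
      rw [h0, ih [y]]
      simp
    rw [List.foldl_cons, hcons]
    have hadd : PySem.Set.add acc y = if acc.contains y = true then acc else acc ++ [y] := rfl
    rw [hadd]
    by_cases hc : acc.contains y = true
    · have hcm : y ∈ acc := by simpa using hc
      rw [if_pos hc, ih acc]
      congr 1
      rw [List.filter_cons]
      rw [if_neg (by simp [hcm])]
      rw [List.filter_filter]
      apply List.filter_congr
      intro s _
      by_cases hy : s = y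
      · subst hy; simp [hcm]
      · simp [hy]
    · have hcm : y ∉ acc := by simpa using hc
      rw [if_neg hc]
      rw [ih (acc ++ [y])]
      rw [List.filter_cons]
      rw [if_pos (by simp [hcm])]
      rw [List.append_assoc, List.singleton_append]
      congr 2
      rw [List.filter_filter]
      apply List.filter_congr
      intro s _
      by_cases hy : s = y
      · subst hy; simp
      · simp [hy]

-- dedup of a concatenation, in first-occurrence order.
lemma dedup_append (xs ys : List String) :
    PySem.List.dedup (xs ++ ys)
      = PySem.List.dedup xs ++ (PySem.List.dedup ys).filter (fun s => !xs.contains s) := by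
  rw [PySem.List.dedup_eq_ofList, PySem.Set.ofList_eq_foldl, List.foldl_append]
  rw [show xs.foldl PySem.Set.add [] = PySem.List.dedup xs by
        rw [PySem.List.dedup_eq_ofList, PySem.Set.ofList_eq_foldl]]
  rw [foldl_add_acc]
  congr 1
  apply List.filter_congr
  intro s _
  have : (PySem.List.dedup xs).contains s = xs.contains s := by
    by_cases h : s ∈ xs
    · simp [h]
    · simp [h]
  rw [this]

-- dedup of a cons, in first-occurrence order.
lemma dedup_cons (y : String) (ys : List String) :
    PySem.List.dedup (y :: ys) = y :: (PySem.List.dedup ys).filter (fun s => !(s == y)) := by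
  rw [PySem.List.dedup_eq_ofList, PySem.Set.ofList_eq_foldl, List.foldl_cons]
  have h0 : PySem.Set.add ([] : List String) y = [y] := rfl
  rw [h0, foldl_add_acc ys [y], List.singleton_append]
  congr 1
  apply List.filter_congr
  intro s _
  by_cases hy : s = y
  · subst hy; simp
  · simp [hy]

-- dedup commutes with filter.
lemma dedup_filter (p : String → Bool) :
    ∀ (l : List String), PySem.List.dedup (l.filter p) = (PySem.List.dedup l).filter p := by
  intro l
  induction l with
  | nil => rfl
  | cons y l ih =>
    rw [List.filter_cons]
    by_cases hp : p y = true
    · rw [if_pos hp, dedup_cons, dedup_cons, List.filter_cons, if_pos hp, ih]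
      rw [List.filter_filter, List.filter_filter]
      congr 1
      apply List.filter_congr
      intro s _
      rw [Bool.and_comm]
    · have hp' : p y = false := eq_false_of_ne_true hp
      rw [if_neg (by simp [hp']), dedup_cons, List.filter_cons, if_neg (by simp [hp']), ih]
      rw [List.filter_filter]
      apply List.filter_congr
      intro s _
      by_cases hy : s = y
      · subst hy; simp [hp']
      · simp [hy]

-- The dedup of one token's match list is the hit-filter of the distinct server pool.
lemma dedup_matches (server : List String) (t : String) :
    PySem.List.dedup (pvMatches server t) = (PySem.List.dedup server).filter (pvHit t) := by
  unfold pvMatches pvHit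
  by_cases hd : PySem.Str.isIn "-" t = true
  · have hfun : (fun s => if PySem.Str.isIn "-" t = true then s == t else PySem.Str.startswith s t)
        = fun s : String => s == t := by
      funext s; rw [if_pos hd]
    rw [if_pos hd, hfun]
    by_cases hm : t ∈ server
    · rw [if_pos hm]
      have hnd : (PySem.List.dedup server).Nodup := PySem.List.nodup_dedup server
      have hmem : t ∈ PySem.List.dedup server := (PySem.List.mem_dedup _ _).mpr hm
      have hcount : (PySem.List.dedup server).count t = 1 := List.count_eq_one_of_mem hnd hmem
      have hbeq : (PySem.List.dedup server).filter (fun s => s == t)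
          = List.replicate ((PySem.List.dedup server).count t) t := List.filter_beq t
      rw [hbeq, hcount]
      rfl
    · rw [if_neg hm]
      have hnil : (PySem.List.dedup server).filter (fun s => s == t) = [] := by
        rw [List.filter_eq_nil_iff]
        intro s hs hb
        have hst : s = t := beq_iff_eq.mp hb
        subst hst
        exact hm ((PySem.List.mem_dedup _ _).mp hs)
      rw [hnil]
      rfl
  · have hd' := eq_false_of_ne_true hd
    have hfun : (fun s => if PySem.Str.isIn "-" t = true then s == t else PySem.Str.startswith s t)
        = fun s : String => PySem.Str.startswith s t := by
      funext s; rw [if_neg (by rw [hd']; simp)]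
    rw [if_neg (by rw [hd']; simp), hfun]
    exact dedup_filter _ server

-- Membership in a token's match list, for elements of the server list.
lemma mem_matches_iff (server : List String) (t s : String) :
    s ∈ pvMatches server t ↔ (pvHit t s = true ∧ s ∈ server) := by
  unfold pvMatches pvHit
  by_cases hd : PySem.Str.isIn "-" t = true
  · rw [if_pos hd, if_pos hd]
    by_cases hm : t ∈ server
    · rw [if_pos hm]
      constructor
      · intro h
        have : s = t := by simpa using h
        subst this
        exact ⟨by simp, hm⟩
      · intro ⟨h1, _⟩
        have : s = t := beq_iff_eq.mp h1
        subst this; simp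
    · rw [if_neg hm]
      constructor
      · intro h; simp at h
      · intro ⟨h1, h2⟩
        have : s = t := beq_iff_eq.mp h1
        subst this; exact absurd h2 hm
  · have hd' := eq_false_of_ne_true hd
    rw [if_neg (by rw [hd']; simp), if_neg (by rw [hd']; simp)]
    simp [List.mem_filter, and_comm]

-- The sieve invariant: starting from the q-filtered distinct pool, the fold over the
-- remaining tokens appends exactly the q-filtered dedup of their concatenated matches.
lemma sieve_invariant (server : List String) :
    ∀ (ts : List String) (out : List String) (q : String → Bool),
      (ts.foldl
        (fun (st : List String × List String) t =>
          (st.1 ++ st.2.filter (fun s => pvHit t s), st.2.filter (fun s => !pvHit t s)))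
        (out, (PySem.List.dedup server).filter q)).1
      = out ++ (PySem.List.dedup (ts.flatMap (fun t => pvMatches server t))).filter q := by
  intro ts
  induction ts with
  | nil => intro out q; simp [PySem.List.dedup]
  | cons t ts ih =>
    intro out q
    rw [List.foldl_cons]
    dsimp only
    have hpool : ((PySem.List.dedup server).filter q).filter (fun s => !pvHit t s)
        = (PySem.List.dedup server).filter (fun s => q s && !pvHit t s) := by
      rw [List.filter_filter]
      apply List.filter_congr; intro s _; rw [Bool.and_comm]
    rw [hpool, ih]
    rw [List.flatMap_cons, dedup_append, List.filter_append, List.append_assoc]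
    congr 1
    congr 1
    · rw [dedup_matches, List.filter_filter, List.filter_filter]
      apply List.filter_congr; intro s _; rw [Bool.and_comm]
    · rw [List.filter_filter]
      apply List.filter_congr
      intro s hs
      have hsrv : s ∈ server := by
        have hs' : s ∈ ts.flatMap (fun t => pvMatches server t) := (PySem.List.mem_dedup _ _).mp hs
        rcases List.mem_flatMap.mp hs' with ⟨t', _, hmem⟩
        exact ((mem_matches_iff server t' s).mp hmem).2
      have hcont : (pvMatches server t).contains s = pvHit t s := by
        by_cases hh : pvHit t s = true
        · have : s ∈ pvMatches server t := (mem_matches_iff server t s).mpr ⟨hh, hsrv⟩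
          simp [hh, this]
        · have hh' : pvHit t s = false := eq_false_of_ne_true hh
          have : s ∉ pvMatches server t := fun hm =>
            hh ((mem_matches_iff server t s).mp hm).1
          simp [hh', this]
      rw [hcont, Bool.and_comm]

-- ===== VERDICT (by name: the statement is the Claim_ definition above) =====
theorem get_accepted_languages_with_tags_spec : Claim_equal_get_accepted_languages_with_tags := by
  intro h server _
  show get_accepted_languages_with_tags h server = get_accepted_languages_with_tags_alt h server
  rw [A_eq_dedup_flatMap]
  unfold get_accepted_languages_with_tags_alt
  dsimp only
  have hpool : PySem.List.dedup server = (PySem.List.dedup server).filter (fun _ => true) := by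
    simp
  rw [hpool, sieve_invariant server _ [] (fun _ => true)]
  simp
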